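-- pv_equiv track=rewrite | github.com/oklen/PEVAE | models/main_pretrain.py | reformat_reference
-- ===== SOURCE A (Python) =====
-- def reformat_reference(ref,mx):
--     res = [[] for i in range(mx)]
--     for index,item in enumerate(ref):
--         for i in range(mx):
--             try:
--                 res[i].append(item[index])
--             except:
--                 res[i].append("BLEU")
--     return res
-- ===== SOURCE B (Python) =====
-- def reformat_reference(ref, mx):
--     seq = []
--     for index, item in enumerate(ref):
--         try:
--             val = item[index]
--         except:
--             val = "BLEU"
--         seq.append(val)
--     return [list(seq) for _ in range(mx)]
-- ===== Notes on version B (the rewrite author's own statement) =====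
-- stated objective: simpler
-- what changed: B computes the diagonal sequence (ref[k][k] or 'BLEU') once in a single pass and returns mx fresh copies of it, instead of A's nested loop that recomputes and appends the same value into each of the mx lists per item; the per-cell try/except and append work is done once per item instead of mx times.
import Mathlib
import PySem

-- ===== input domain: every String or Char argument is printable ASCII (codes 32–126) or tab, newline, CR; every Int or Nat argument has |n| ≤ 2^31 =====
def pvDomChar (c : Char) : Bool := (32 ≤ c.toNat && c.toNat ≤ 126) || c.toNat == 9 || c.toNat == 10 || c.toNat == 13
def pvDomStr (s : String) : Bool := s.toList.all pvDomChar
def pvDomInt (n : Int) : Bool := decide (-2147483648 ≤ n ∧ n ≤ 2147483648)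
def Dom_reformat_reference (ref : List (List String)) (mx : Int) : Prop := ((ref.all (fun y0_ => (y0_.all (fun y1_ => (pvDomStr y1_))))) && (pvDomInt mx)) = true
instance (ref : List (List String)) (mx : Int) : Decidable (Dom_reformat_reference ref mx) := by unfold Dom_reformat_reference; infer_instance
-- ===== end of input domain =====

-- B computes the diagonal sequence once and replicates it mx times, instead of A's
-- nested loop recomputing the same value into each of the mx result lists (simpler).

-- ===== PORT A =====
-- res[i].append(v): i always satisfies 0 ≤ i < len(res) (it comes from range(mx)), so set/getD at i.toNat is exact
def pvAppendAt (res : List (List String)) (i : Int) (v : String) : List (List String) :=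
  res.set i.toNat ((res.getD i.toNat []) ++ [v])

def reformat_reference (ref : List (List String)) (mx : Int) : List (List String) :=
  let res := (PySem.List.pyRange 0 mx 1).map (fun _ => ([] : List String))
  (PySem.List.enumerate ref 0).foldl (fun res p =>
    (PySem.List.pyRange 0 mx 1).foldl (fun res i =>
      -- try: res[i].append(item[index]) / except: res[i].append("BLEU"); item[index] is the only raising step
      match PySem.List.pyGet? p.2 p.1 with
      | some x => pvAppendAt res i x
      | none => pvAppendAt res i "BLEU") res) res

-- ===== PORT B =====
def reformat_reference_alt (ref : List (List String)) (mx : Int) : List (List String) :=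
  let seq := (PySem.List.enumerate ref 0).foldl (fun seq p =>
    seq ++ [match PySem.List.pyGet? p.2 p.1 with | some v => v | none => "BLEU"]) []
  (PySem.List.pyRange 0 mx 1).map (fun _ => seq)

-- ===== PRECONDITION & SPEC =====
def Spec_reformat_reference (ref : List (List String)) (mx : Int) (out : List (List String)) : Prop := out = reformat_reference_alt ref mx
instance (ref : List (List String)) (mx : Int) (out : List (List String)) : Decidable (Spec_reformat_reference ref mx out) := by unfold Spec_reformat_reference; infer_instance

-- ===== CLAIM (what is proved, stated in full; the proofs are below) =====
def Claim_equal_reformat_reference : Prop := ∀ (ref : List (List String)) (mx : Int), Dom_reformat_reference ref mx → Spec_reformat_reference ref mx (reformat_reference ref mx)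

-- ===== LEMMAS AND PROOFS =====

-- shifting one copy across an all-equal block
lemma replicate_append_cons {α : Type} (a : Nat) (t : α) (l : List α) :
    List.replicate a t ++ t :: l = t :: (List.replicate a t ++ l) := by
  induction a with
  | zero => simp
  | succ a ih => simp [List.replicate_succ, ih]

-- the inner range' fold appends v to each slot; intermediate state mixes done/undone halves
lemma inner_fold (v : String) (b : Nat) : ∀ (a : Nat) (s : List String),
    (List.range' a b).foldl (fun r k => r.set k ((r.getD k []) ++ [v]))
      (List.replicate a (s ++ [v]) ++ List.replicate b s)
    = List.replicate (a + b) (s ++ [v]) := by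
  induction b with
  | zero => intro a s; simp
  | succ b ih =>
    intro a s
    rw [List.range'_succ, List.foldl_cons]
    have hget : ((List.replicate a (s ++ [v]) ++ List.replicate (b + 1) s).getD a []) = s := by
      simp [List.getD]
    have hset : (List.replicate a (s ++ [v]) ++ List.replicate (b + 1) s).set a (s ++ [v])
        = List.replicate (a + 1) (s ++ [v]) ++ List.replicate b s := by
      rw [List.set_append]
      simp [List.replicate_succ, replicate_append_cons]
    rw [hget, hset, ih (a + 1) s]
    congr 1
    omega
-- the same fold phrased over pyRange 0 mx 1, on an all-equal state
lemma inner_pyRange (mx : Int) (v : String) (s : List String) :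
    (PySem.List.pyRange 0 mx 1).foldl (fun r i => pvAppendAt r i v) (List.replicate mx.toNat s)
    = List.replicate mx.toNat (s ++ [v]) := by
  rw [PySem.List.pyRange_one, List.foldl_map]
  simp only [pvAppendAt, zero_add, Int.toNat_natCast, Int.sub_zero]
  rw [List.range_eq_range']
  simpa using inner_fold v mx.toNat 0 s

-- outer invariant: A's state stays mx.toNat equal copies of B's accumulated sequence
lemma outer_fold (mx : Int) (items : List (List String)) : ∀ (j : Int) (s : List String),
    (PySem.List.enumerate items j).foldl (fun res p =>
      (PySem.List.pyRange 0 mx 1).foldl (fun res i =>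
        match PySem.List.pyGet? p.2 p.1 with
        | some x => pvAppendAt res i x
        | none => pvAppendAt res i "BLEU") res) (List.replicate mx.toNat s)
    = List.replicate mx.toNat ((PySem.List.enumerate items j).foldl (fun seq p =>
        seq ++ [match PySem.List.pyGet? p.2 p.1 with | some v => v | none => "BLEU"]) s) := by
  induction items with
  | nil => intro j s; simp [PySem.List.enumerate]
  | cons x xs ih =>
    intro j s
    rw [PySem.List.enumerate_cons, List.foldl_cons, List.foldl_cons]
    cases h : PySem.List.pyGet? x j with
    | some v => rw [inner_pyRange mx v s, ih]
    | none => rw [inner_pyRange mx "BLEU" s, ih]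

-- ===== VERDICT (by name: the statement is the Claim_ definition above) =====
theorem reformat_reference_spec : Claim_equal_reformat_reference := by
  intro ref mx _
  show reformat_reference ref mx = reformat_reference_alt ref mx
  unfold reformat_reference reformat_reference_alt
  have hinit : (PySem.List.pyRange 0 mx 1).map (fun _ => ([] : List String))
      = List.replicate mx.toNat ([] : List String) := by
    rw [List.map_const']
    simp [PySem.List.length_pyRange_one]
  have hrep : ∀ (s : List String), (PySem.List.pyRange 0 mx 1).map (fun _ => s)
      = List.replicate mx.toNat s := by
    intro s; rw [List.map_const']; simp [PySem.List.length_pyRange_one]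
  simp only [hinit, hrep]
  exact outer_fold mx ref 0 []
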